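-- pv_equiv track=rewrite | github.com/pypi-data/pypi-mirror-60 | packages/metaphor-gm/metaphor_gm-20.2.1.1.tar.gz/metaphor_gm-20.2.1.1/metaphor/chem_gm/core/atoms.py | sortatomlist
-- ===== SOURCE A (Python) =====
-- Atomes = ['C', 'N', 'O', 'F', 'Cl', 'Br', 'I', 'Si', 'S', 'P' , 'Ge', 'B']
--
-- def sortatomlist(source, candidate=Atomes):
--     """Sorting the 'source' atom list with respect to the order of a submitted list 'candidate'.
--     Erase duplicates if exist.
--     Return the sorted list and the remaining
--     Initial list remain unmodified.
--     """
--     if isinstance(candidate, int):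
--         candidate = Atomes[:candidate]
--     if isinstance(source, str):
--         source = source.split(",")
--     res = []
--     source = source[:]
--     for value in candidate:
--         if value in source:
--             res.append(source.pop(source.index(value)))
--     return res, source
-- ===== SOURCE B (Python) =====
-- Atomes = ['C', 'N', 'O', 'F', 'Cl', 'Br', 'I', 'Si', 'S', 'P' , 'Ge', 'B']
--
-- def sortatomlist(source, candidate=Atomes):
--     """Counter-based rewrite: tally the source once, select candidates while a
--     tally remains, then build the remaining list in one skip-scan over the
--     untouched source (no pop/index on a shrinking working copy)."""
--     if isinstance(candidate, int):
--         candidate = Atomes[:candidate]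
--     if isinstance(source, str):
--         source = source.split(",")
--     avail = {}
--     for value in source:
--         avail[value] = avail.get(value, 0) + 1
--     consumed = {}
--     res = []
--     for value in candidate:
--         if avail.get(value, 0) > 0:
--             avail[value] = avail.get(value, 0) - 1
--             consumed[value] = consumed.get(value, 0) + 1
--             res.append(value)
--     remaining = []
--     for value in source:
--         if consumed.get(value, 0) > 0:
--             consumed[value] = consumed.get(value, 0) - 1
--         else:
--             remaining.append(value)
--     return res, remaining
-- ===== Notes on version B (the rewrite author's own statement) =====
-- stated objective: faster
-- what changed: Replaces A's mutate-a-working-copy loop (in-test, index, pop on the shrinking source copy, all linear scans) by hash counters: one tally pass over source, one counter-guarded selection pass over candidate, and one skip-scan over the untouched source for the remaining list.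
import Mathlib
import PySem

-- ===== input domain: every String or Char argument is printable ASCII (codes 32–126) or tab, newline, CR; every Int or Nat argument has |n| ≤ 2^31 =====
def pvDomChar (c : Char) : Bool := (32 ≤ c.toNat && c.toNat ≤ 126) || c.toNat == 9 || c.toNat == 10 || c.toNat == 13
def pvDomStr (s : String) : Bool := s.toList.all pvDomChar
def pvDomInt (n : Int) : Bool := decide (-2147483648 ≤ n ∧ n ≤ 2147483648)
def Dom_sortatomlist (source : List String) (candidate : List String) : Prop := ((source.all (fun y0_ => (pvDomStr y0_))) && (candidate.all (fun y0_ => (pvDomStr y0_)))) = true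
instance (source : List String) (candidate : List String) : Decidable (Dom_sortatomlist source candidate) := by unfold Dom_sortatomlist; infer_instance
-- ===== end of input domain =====

-- B replaces A's pop-from-a-working-copy loop (linear in/index/pop scans per candidate) by
-- hash counters: tally source once, select candidates while a tally remains, then one
-- skip-scan over the untouched source builds the remaining list ("faster").

-- ===== PORT A =====
-- for value in candidate: if value in source: res.append(source.pop(source.index(value)))
def sortatomlist (source : List String) (candidate : List String) : List String × List String :=
  candidate.foldl (fun st value =>
    if value ∈ st.2 then
      match PySem.List.index? st.2 value with
      | some i =>
        match PySem.List.pop? st.2 (i : Int) with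
        | some (x, src') => (st.1 ++ [x], src')
        | none => st
      | none => st
    else st) ([], source)

-- ===== PORT B =====
def sortatomlist_alt (source : List String) (candidate : List String) : List String × List String :=
  -- avail = {}; for value in source: avail[value] = avail.get(value, 0) + 1
  let avail := source.foldl (fun (d : PySem.Dict String Int) value =>
    d.insert value (d.getD value 0 + 1)) PySem.Dict.empty
  -- for value in candidate: if avail.get(value,0) > 0: decrement avail, increment consumed, append
  let st := candidate.foldl
    (fun (st : PySem.Dict String Int × PySem.Dict String Int × List String) value =>
      if st.1.getD value 0 > 0 then
        (st.1.insert value (st.1.getD value 0 - 1),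
         st.2.1.insert value (st.2.1.getD value 0 + 1),
         st.2.2 ++ [value])
      else st)
    (avail, PySem.Dict.empty, [])
  -- for value in source: if consumed.get(value,0) > 0: decrement, else remaining.append(value)
  let fin := source.foldl
    (fun (st : PySem.Dict String Int × List String) value =>
      if st.1.getD value 0 > 0 then (st.1.insert value (st.1.getD value 0 - 1), st.2)
      else (st.1, st.2 ++ [value]))
    (st.2.1, [])
  (st.2.2, fin.2)

-- ===== PRECONDITION & SPEC =====
def Spec_sortatomlist (source : List String) (candidate : List String) (out : List String × List String) : Prop := out = sortatomlist_alt source candidate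
instance (source : List String) (candidate : List String) (out : List String × List String) : Decidable (Spec_sortatomlist source candidate out) := by unfold Spec_sortatomlist; infer_instance

-- ===== CLAIM (what is proved, stated in full; the proofs are below) =====
def Claim_equal_sortatomlist : Prop := ∀ (source : List String) (candidate : List String), Dom_sortatomlist source candidate → Spec_sortatomlist source candidate (sortatomlist source candidate)

-- ===== LEMMAS AND PROOFS =====

-- abbreviations for the two fold bodies (proof-local)
def pvStepA (st : List String × List String) (value : String) : List String × List String :=
  if value ∈ st.2 then
    match PySem.List.index? st.2 value with
    | some i =>
      match PySem.List.pop? st.2 (i : Int) with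
      | some (x, src') => (st.1 ++ [x], src')
      | none => st
    | none => st
  else st

def pvResB (source : List String) (cand : List String) (res : List String) : List String :=
  cand.foldl (fun res value =>
    if PySem.List.count source value > PySem.List.count res value then res ++ [value] else res) res

-- A's step, when the value is present, pops exactly the first occurrence
theorem pvStepA_mem (res src : List String) (v : String) (h : v ∈ src) :
    pvStepA (res, src) v = (res ++ [v], src.erase v) := by
  have hidx : ∃ k : Nat, PySem.List.index? src v = some k ∧
      PySem.List.pop? src (k : Int) = some (v, src.erase v) := by
    induction src with
    | nil => cases h
    | cons x xs ih =>
      by_cases hx : x = v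
      · subst hx
        refine ⟨0, ?_, ?_⟩
        · rw [PySem.List.index?_cons_self]
        · rw [show ((0 : Nat) : Int) = 0 by rfl, PySem.List.pop?_zero_cons]
          rw [List.erase_cons_head]
      · have hv : v ∈ xs := by
          cases h with
          | head => exact absurd rfl hx
          | tail _ h => exact h
        obtain ⟨k, h1, h2⟩ := ih hv
        obtain ⟨hk, hxk, -⟩ := PySem.List.getElem_of_index?_eq_some h1
        have hpz := PySem.List.pop?_natCast xs k hk
        rw [hpz] at h2
        have herase : xs.eraseIdx k = xs.erase v := by
          have := Option.some.inj h2
          exact (Prod.mk.injEq _ _ _ _ ▸ this).2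
        refine ⟨k + 1, ?_, ?_⟩
        · rw [PySem.List.index?_cons_of_ne _ hx, h1]; rfl
        · have hk1 : k + 1 < (x :: xs).length := by simp; omega
          have := PySem.List.pop?_natCast (x :: xs) (k + 1) hk1
          rw [this]
          simp [List.eraseIdx_cons_succ, herase, hxk, List.erase_cons_tail,
            beq_iff_eq, hx]
  obtain ⟨k, h1, h2⟩ := hidx
  obtain ⟨hk, hxk, -⟩ := PySem.List.getElem_of_index?_eq_some h1
  simp only [pvStepA, if_pos h, h1, h2]

theorem pvStepA_not_mem (res src : List String) (v : String) (h : v ∉ src) :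
    pvStepA (res, src) v = (res, src) := by
  simp [pvStepA, h]

-- A's result list equals B's count-based selection, under the count invariant
theorem pvResA_eq_resB (source : List String) (cand : List String) :
    ∀ (res src : List String),
      (∀ v, src.count v + res.count v = source.count v) →
      (cand.foldl pvStepA (res, src)).1 = pvResB source cand res := by
  induction cand with
  | nil => intro res src _; simp [pvResB]
  | cons c cs ih =>
    intro res src hinv
    by_cases hc : c ∈ src
    · have hcond : List.count c res < List.count c source := by
        have := hinv c
        have hpos : 0 < src.count c := List.count_pos_iff.mpr hc
        omega
      have hinv' : ∀ v, (src.erase c).count v + (res ++ [c]).count v = source.count v := by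
        intro v
        have := hinv v
        rw [List.count_erase, List.count_append]
        by_cases hv : v = c
        · subst hv
          have hpos : 0 < src.count v := List.count_pos_iff.mpr hc
          simp; omega
        · simp [beq_iff_eq, Ne.symm hv]
          omega
      calc (List.foldl pvStepA (res, src) (c :: cs)).1
          = (List.foldl pvStepA (res ++ [c], src.erase c) cs).1 := by
            rw [List.foldl_cons, pvStepA_mem _ _ _ hc]
        _ = pvResB source cs (res ++ [c]) := ih _ _ hinv'
        _ = pvResB source (c :: cs) res := by
            simp only [pvResB, List.foldl_cons, PySem.List.count_eq, gt_iff_lt, if_pos hcond]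
    · have hcond : ¬ List.count c res < List.count c source := by
        have := hinv c
        have hz : src.count c = 0 := List.count_eq_zero.mpr hc
        omega
      calc (List.foldl pvStepA (res, src) (c :: cs)).1
          = (List.foldl pvStepA (res, src) cs).1 := by
            rw [List.foldl_cons, pvStepA_not_mem _ _ _ hc]
        _ = pvResB source cs res := ih _ _ hinv
        _ = pvResB source (c :: cs) res := by
            simp only [pvResB, List.foldl_cons, PySem.List.count_eq, gt_iff_lt, if_neg hcond]

-- A's fold only appends to the result component
theorem pvResA_prefix (cand : List String) :
    ∀ (res src : List String), ∃ t, (cand.foldl pvStepA (res, src)).1 = res ++ t := by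
  induction cand with
  | nil => intro res src; exact ⟨[], by simp⟩
  | cons c cs ih =>
    intro res src
    by_cases hc : c ∈ src
    · obtain ⟨t, ht⟩ := ih (res ++ [c]) (src.erase c)
      exact ⟨c :: t, by rw [List.foldl_cons, pvStepA_mem _ _ _ hc, ht]; simp⟩
    · obtain ⟨t, ht⟩ := ih res src
      exact ⟨t, by rw [List.foldl_cons, pvStepA_not_mem _ _ _ hc, ht]⟩

-- folding erase over [] gives []
theorem pvFoldErase_nil (taken : List String) :
    taken.foldl (fun (s : List String) v => s.erase v) [] = [] := by
  induction taken with
  | nil => rfl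
  | cons t ts ih => simpa using ih

-- erasing the head: consume one occurrence of v from taken
theorem pvFoldErase_cons_mem (v : String) (s : List String) :
    ∀ taken : List String, v ∈ taken →
      taken.foldl (fun (s : List String) v => s.erase v) (v :: s)
        = (taken.erase v).foldl (fun (s : List String) v => s.erase v) s := by
  intro taken
  induction taken generalizing s with
  | nil => intro h; cases h
  | cons t ts ih =>
    intro h
    by_cases ht : t = v
    · subst ht; simp [List.erase_cons_head]
    · have hv : v ∈ ts := by
        cases h with
        | head => exact absurd rfl ht
        | tail _ h => exact h
      have h1 : (v :: s).erase t = v :: s.erase t :=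
        List.erase_cons_tail (by simpa [beq_iff_eq] using Ne.symm ht)
      have h2 : (t :: ts).erase v = t :: ts.erase v :=
        List.erase_cons_tail (by simpa [beq_iff_eq] using ht)
      rw [List.foldl_cons, h1, ih (s.erase t) hv, h2, List.foldl_cons]

theorem pvFoldErase_cons_not_mem (v : String) (s : List String) :
    ∀ taken : List String, v ∉ taken →
      taken.foldl (fun (s : List String) v => s.erase v) (v :: s)
        = v :: taken.foldl (fun (s : List String) v => s.erase v) s := by
  intro taken
  induction taken generalizing s with
  | nil => intro _; rfl
  | cons t ts ih =>
    intro h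
    have ht : t ≠ v := fun e => h (e ▸ List.mem_cons_self)
    have hts : v ∉ ts := fun hv => h (List.mem_cons_of_mem _ hv)
    have h1 : (v :: s).erase t = v :: s.erase t :=
      List.erase_cons_tail (by simpa [beq_iff_eq] using Ne.symm ht)
    rw [List.foldl_cons, h1, ih (s.erase t) hts, List.foldl_cons]

-- proof-local names for B's three fold bodies
def pvAvail (source : List String) : PySem.Dict String Int :=
  source.foldl (fun (d : PySem.Dict String Int) value =>
    d.insert value (d.getD value 0 + 1)) PySem.Dict.empty

def pvStepB (st : PySem.Dict String Int × PySem.Dict String Int × List String)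
    (value : String) : PySem.Dict String Int × PySem.Dict String Int × List String :=
  if st.1.getD value 0 > 0 then
    (st.1.insert value (st.1.getD value 0 - 1),
     st.2.1.insert value (st.2.1.getD value 0 + 1),
     st.2.2 ++ [value])
  else st

def pvStepC (st : PySem.Dict String Int × List String) (value : String) :
    PySem.Dict String Int × List String :=
  if st.1.getD value 0 > 0 then (st.1.insert value (st.1.getD value 0 - 1), st.2)
  else (st.1, st.2 ++ [value])

theorem pvResB_cons (source : List String) (c : String) (cs res : List String) :
    pvResB source (c :: cs) res
      = pvResB source cs (if List.count c res < List.count c source then res ++ [c] else res) := by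
  simp only [pvResB, List.foldl_cons, PySem.List.count_eq, gt_iff_lt]

-- B's selection loop: the appended list is the count-based selection, and the
-- consumed counter records exactly its multiplicities
theorem pvFoldB (source : List String) (cand : List String) :
    ∀ (avail consumed : PySem.Dict String Int) (res : List String),
      (∀ v, avail.getD v 0 = (source.count v : Int) - (res.count v : Int)) →
      (∀ v, consumed.getD v 0 = (res.count v : Int)) →
      (cand.foldl pvStepB (avail, consumed, res)).2.2 = pvResB source cand res ∧
      ∀ v, (cand.foldl pvStepB (avail, consumed, res)).2.1.getD v 0
            = ((pvResB source cand res).count v : Int) := by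
  induction cand with
  | nil =>
    intro avail consumed res h1 h2
    exact ⟨by simp [pvResB], by simpa [pvResB] using h2⟩
  | cons c cs ih =>
    intro avail consumed res h1 h2
    by_cases hc : List.count c res < List.count c source
    · have hgt : avail.getD c 0 > 0 := by rw [h1 c]; omega
      have h1' : ∀ v, (avail.insert c (avail.getD c 0 - 1)).getD v 0
          = (source.count v : Int) - ((res ++ [c]).count v : Int) := by
        intro v
        rw [PySem.Dict.getD_insert]
        by_cases hv : v = c
        · subst hv
          rw [if_pos rfl, h1 v, List.count_append]
          simp; omega
        · rw [if_neg hv, h1 v, List.count_append]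
          simp [Ne.symm hv]
      have h2' : ∀ v, (consumed.insert c (consumed.getD c 0 + 1)).getD v 0
          = ((res ++ [c]).count v : Int) := by
        intro v
        rw [PySem.Dict.getD_insert]
        by_cases hv : v = c
        · subst hv
          rw [if_pos rfl, h2 v, List.count_append]
          simp
        · rw [if_neg hv, h2 v, List.count_append]
          simp [Ne.symm hv]
      rw [List.foldl_cons, pvResB_cons, if_pos hc,
        show pvStepB (avail, consumed, res) c
          = (avail.insert c (avail.getD c 0 - 1),
             consumed.insert c (consumed.getD c 0 + 1), res ++ [c]) by
          simp [pvStepB, hgt]]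
      exact ih _ _ _ h1' h2'
    · have hle : ¬ avail.getD c 0 > 0 := by rw [h1 c]; omega
      rw [List.foldl_cons, pvResB_cons, if_neg hc,
        show pvStepB (avail, consumed, res) c = (avail, consumed, res) by
          simp [pvStepB, hle]]
      exact ih _ _ _ h1 h2

-- B's skip-scan over source, driven by a counter of taken, computes the
-- repeated-erase of taken from source
theorem pvSkipScan (src : List String) :
    ∀ (c : PySem.Dict String Int) (taken rem : List String),
      (∀ v, c.getD v 0 = (taken.count v : Int)) →
      (src.foldl pvStepC (c, rem)).2
        = rem ++ taken.foldl (fun (s : List String) v => s.erase v) src := by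
  induction src with
  | nil => intro c taken rem _; simp [pvFoldErase_nil]
  | cons v rest ih =>
    intro c taken rem h
    by_cases hv : v ∈ taken
    · have hpos : 0 < taken.count v := List.count_pos_iff.mpr hv
      have hgt : c.getD v 0 > 0 := by rw [h v]; omega
      have h' : ∀ w, (c.insert v (c.getD v 0 - 1)).getD w 0
          = ((taken.erase v).count w : Int) := by
        intro w
        rw [PySem.Dict.getD_insert]
        by_cases hw : w = v
        · subst hw
          rw [if_pos rfl, h w, List.count_erase_self]
          omega
        · rw [if_neg hw, h w, List.count_erase_of_ne hw]
      rw [List.foldl_cons,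
        show pvStepC (c, rem) v = (c.insert v (c.getD v 0 - 1), rem) by
          simp [pvStepC, hgt],
        ih _ _ _ h', pvFoldErase_cons_mem v rest taken hv]
    · have hz : ¬ c.getD v 0 > 0 := by
        rw [h v, List.count_eq_zero.mpr hv]; omega
      rw [List.foldl_cons,
        show pvStepC (c, rem) v = (c, rem ++ [v]) by simp [pvStepC, hz],
        ih _ _ _ h, pvFoldErase_cons_not_mem v rest taken hv]
      simp

-- A's remaining source equals repeated-erase of the selected values
theorem pvSrcA (cand : List String) :
    ∀ (res src : List String),
      (cand.foldl pvStepA (res, src)).2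
        = ((cand.foldl pvStepA (res, src)).1.drop res.length).foldl
            (fun (s : List String) v => s.erase v) src := by
  induction cand with
  | nil => intro res src; simp
  | cons c cs ih =>
    intro res src
    by_cases hc : c ∈ src
    · rw [List.foldl_cons, pvStepA_mem _ _ _ hc]
      obtain ⟨t, ht⟩ := pvResA_prefix cs (res ++ [c]) (src.erase c)
      rw [ih (res ++ [c]) (src.erase c), ht]
      have h1 : ((res ++ [c]) ++ t).drop res.length = c :: t := by
        rw [List.append_assoc, List.drop_append_of_le_length (le_refl _)]
        simp
      have h2 : ((res ++ [c]) ++ t).drop (res ++ [c]).length = t := by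
        rw [List.drop_append_of_le_length (le_refl _)]
        simp
      rw [h1, h2, List.foldl_cons]
    · rw [List.foldl_cons, pvStepA_not_mem _ _ _ hc]
      exact ih res src

-- ===== VERDICT (by name: the statement is the Claim_ definition above) =====
theorem sortatomlist_spec : Claim_equal_sortatomlist := by
  intro source candidate _
  unfold Spec_sortatomlist
  -- A's loop, named
  have hA : sortatomlist source candidate = candidate.foldl pvStepA ([], source) := rfl
  -- B's three loops, named
  have hB : sortatomlist_alt source candidate
      = ((candidate.foldl pvStepB (pvAvail source, PySem.Dict.empty, [])).2.2,
         (source.foldl pvStepC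
           ((candidate.foldl pvStepB (pvAvail source, PySem.Dict.empty, [])).2.1, [])).2) := rfl
  have havail : ∀ v, (pvAvail source).getD v 0 = (source.count v : Int) := by
    intro v
    unfold pvAvail
    rw [PySem.Dict.getD_foldl_insert_add_one]
    simp [PySem.Dict.getD_empty]
  obtain ⟨hres2, hcons⟩ := pvFoldB source candidate (pvAvail source) PySem.Dict.empty []
    (by intro v; rw [havail v]; simp)
    (by intro v; simp [PySem.Dict.getD_empty])
  have hscan := pvSkipScan source
    (candidate.foldl pvStepB (pvAvail source, PySem.Dict.empty, [])).2.1
    (pvResB source candidate []) [] hcons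
  have hresA : (candidate.foldl pvStepA ([], source)).1 = pvResB source candidate [] :=
    pvResA_eq_resB source candidate [] source (by intro v; simp)
  have hsrcA := pvSrcA candidate [] source
  rw [hresA] at hsrcA
  simp only [List.length_nil, List.drop_zero] at hsrcA
  rw [hA, hB, hres2, hscan]
  exact Prod.ext hresA (by rw [hsrcA]; simp)
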